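-- pv_equiv track=rewrite | github.com/kkr010128/codebert | problem181/problem181_113.py | bfs
-- ===== SOURCE A (Python) =====
-- from collections import deque
--
-- def bfs(k):
--     lunlun = []
--     q = deque()
--     count = 0
--     for i in range(1, 10):
--         lunlun.append(i)
--         q.append(i)
--         count += 1
--
--     if count >= k:return lunlun[k - 1]
--
--     while True:
--         num = q.popleft()
--         tail = num % 10
--         for i in [-1, 0, 1]:
--             temp = tail + i
--             if temp == -1 or temp == 10:continue
--             q.append(num * 10 + temp)
--             lunlun.append(num * 10 + temp)
--             count += 1
--             if k == count:return lunlun[k - 1]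
-- ===== SOURCE B (Python) =====
-- # Digit-DP: count lunlun numbers per (length, leading digit), then build the
-- # k-th smallest directly digit by digit -- O(log^2 k) instead of A's O(k) BFS.
-- def bfs(k):
--     # nbrs[d] = digits that may follow digit d
--     nbrs = [[e for e in range(10) if abs(e - d) <= 1] for d in range(10)]
--     # rows[m][d] = number of lunlun digit strings of length m+1 starting with d
--     rows = [[1] * 10]
--     while sum(rows[-1][1:]) < k:
--         k -= sum(rows[-1][1:])
--         prev = rows[-1]
--         rows.append([sum(prev[e] for e in nbrs[d]) for d in range(10)])
--     # k-th (1-based) lunlun number with len(rows) digits, in increasing order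
--     num = 0
--     digits = list(range(1, 10))
--     for row in reversed(rows):
--         for d in digits:
--             if k <= row[d]:
--                 num = num * 10 + d
--                 digits = nbrs[d]
--                 break
--             k -= row[d]
--     return num
-- ===== Notes on version B (the rewrite author's own statement) =====
-- stated objective: faster
-- what changed: Replaces the O(k) breadth-first enumeration of all lunlun numbers up to the k-th by digit DP: count lunlun numbers per (length, leading digit) and construct the k-th smallest directly digit by digit, O(log^2 k) table work.
-- intended difference: For -7 <= k <= 0 A's negative-index wraparound lunlun[k-1] returns the accidental value k+9, while B returns 1, the smallest lunlun number -- the natural answer of the direct construction on the unspecified nonpositive corner (at k=-8 both happen to return 1). — e.g. on bfs(0): A returns 9, B returns 1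
-- outside the precondition, e.g. on bfs(-9): A raises IndexError, B returns 1
import Mathlib
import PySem

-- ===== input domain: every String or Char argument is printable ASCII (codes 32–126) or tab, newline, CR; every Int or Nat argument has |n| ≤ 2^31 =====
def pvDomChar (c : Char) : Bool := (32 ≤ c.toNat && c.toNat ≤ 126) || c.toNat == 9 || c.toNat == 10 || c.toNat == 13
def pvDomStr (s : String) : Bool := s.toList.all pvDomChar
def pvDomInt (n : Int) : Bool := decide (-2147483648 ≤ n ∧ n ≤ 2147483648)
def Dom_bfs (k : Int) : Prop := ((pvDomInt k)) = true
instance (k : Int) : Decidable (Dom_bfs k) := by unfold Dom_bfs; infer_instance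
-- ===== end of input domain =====

-- B replaces A's O(k) BFS enumeration by digit DP (count lunlun numbers per length and
-- leading digit, then build the k-th directly); objective: faster (asymptotic).

-- ===== PORT A =====
-- inner `for i in [-1,0,1]` loop with its early `return lunlun[k-1]`;
-- that index is always in range when reached, so pyGet? … |>.getD 0 is exact there
def bfsInner (k num tail : Int) :
    List Int → List Int → List Int → Int → Option Int × List Int × List Int × Int
  | [], q, lunlun, count => (none, q, lunlun, count)
  | i :: is, q, lunlun, count =>
    let temp := tail + i
    if temp = -1 ∨ temp = 10 then bfsInner k num tail is q lunlun count
    else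
      let q' := q ++ [num * 10 + temp]
      let lunlun' := lunlun ++ [num * 10 + temp]
      let count' := count + 1
      if k = count' then (some ((PySem.List.pyGet? lunlun' (k - 1)).getD 0), q', lunlun', count')
      else bfsInner k num tail is q' lunlun' count'

-- `while True` loop; fuel only makes it total (inside Pre_ the return fires before fuel runs out)
def bfsLoop (k : Int) : Nat → List Int → List Int → Int → Int
  | 0, _, _, _ => 0
  | fuel + 1, q, lunlun, count =>
    match q with
    | [] => 0      -- q.popleft() on an empty deque: never reached
    | num :: rest =>
      let tail := PySem.Int.mod num 10
      match bfsInner k num tail [-1, 0, 1] rest lunlun count with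
      | (some r, _, _, _) => r
      | (none, q', lunlun', count') => bfsLoop k fuel q' lunlun' count'

def bfs (k : Int) : Int :=
  let init := (PySem.List.pyRange 1 10 1).foldl
    (fun (st : List Int × List Int × Int) i => (st.1 ++ [i], st.2.1 ++ [i], st.2.2 + 1))
    ([], [], 0)
  if init.2.2 ≥ k then (PySem.List.pyGet? init.1 (k - 1)).getD 0
  else bfsLoop k k.toNat init.2.1 init.1 init.2.2

-- ===== PORT B =====
-- nbrs[d] = digits that may follow digit d
def nbrs (d : Int) : List Int :=
  (PySem.List.pyRange 0 10 1).filter (fun e => decide (|e - d| ≤ 1))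

def nextRow (prev : List Int) : List Int :=
  (PySem.List.pyRange 0 10 1).map (fun d => ((nbrs d).map (fun e => PySem.List.pyGetD prev e 0)).sum)

-- sum(row[1:])
def rowTotal (row : List Int) : Int := (PySem.List.slice row (some 1) none).sum

-- the `while sum(rows[-1][1:]) < k` loop; fuel only makes it total
def growRows : Nat → Int → List (List Int) → Int × List (List Int)
  | 0, k, rows => (k, rows)
  | fuel + 1, k, rows =>
    let last := (PySem.List.pyGet? rows (-1)).getD []
    if rowTotal last < k then growRows fuel (k - rowTotal last) (rows ++ [nextRow last])
    else (k, rows)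

-- the inner `for d in digits` loop with its break
def scanDigits (row : List Int) (num : Int) : List Int → Int → Int × List Int × Int
  | [], k => (num, [], k)      -- loop exhausted without break: never reached in range
  | d :: ds, k =>
    if k ≤ PySem.List.pyGetD row d 0 then (num * 10 + d, nbrs d, k)
    else scanDigits row num ds (k - PySem.List.pyGetD row d 0)

-- `for row in reversed(rows)`
def descend : List (List Int) → Int → List Int → Int → Int
  | [], num, _, _ => num
  | row :: rest, num, digits, k =>
    let s := scanDigits row num digits k
    descend rest s.1 s.2.1 s.2.2

def bfs_alt (k : Int) : Int :=
  let g := growRows k.toNat k [List.replicate 10 1]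
  descend g.2.reverse 0 (PySem.List.pyRange 1 10 1) g.1

-- ===== PRECONDITION & SPEC =====
-- Pre_ excludes only k ≤ -9, where A raises IndexError (lunlun[k-1] out of range)
def Pre_bfs (k : Int) : Prop := -8 ≤ k
instance (k : Int) : Decidable (Pre_bfs k) := by unfold Pre_bfs; infer_instance
def pvWitness_bfs : Int := 1

-- For -7 ≤ k ≤ 0 A's negative-index wraparound lunlun[k-1] returns the accidental value k+9,
-- while B returns 1, the smallest lunlun number — the natural answer of the direct construction
-- on this unspecified nonpositive corner (at k = -8 both happen to return 1).
def D_bfs (k : Int) : Prop := -7 ≤ k ∧ k ≤ 0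
instance (k : Int) : Decidable (D_bfs k) := by unfold D_bfs; infer_instance

def Spec_bfs (k : Int) (out : Int) : Prop := ¬ D_bfs k → out = bfs_alt k
instance (k : Int) (out : Int) : Decidable (Spec_bfs k out) := by unfold Spec_bfs; infer_instance

def pvDiffWitness_bfs : Int := 0
def pvDiffWitnessOut_bfs : Int × Int := (9, 1)

-- ===== CLAIM (what is proved, stated in full; the proofs are below) =====
def Claim_unchanged_bfs : Prop := ∀ (k : Int), Dom_bfs k → Pre_bfs k → Spec_bfs k (bfs k)
def Claim_changed_bfs : Prop := Dom_bfs (pvDiffWitness_bfs) ∧ Pre_bfs (pvDiffWitness_bfs) ∧ D_bfs (pvDiffWitness_bfs) ∧ bfs (pvDiffWitness_bfs) = pvDiffWitnessOut_bfs.1 ∧ bfs_alt (pvDiffWitness_bfs) = pvDiffWitnessOut_bfs.2 ∧ pvDiffWitnessOut_bfs.1 ≠ pvDiffWitnessOut_bfs.2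
def Claim_exact_bfs : Prop := ∀ (k : Int), Dom_bfs k → Pre_bfs k → D_bfs k → bfs k ≠ bfs_alt k

-- ===== LEMMAS AND PROOFS =====

-- spec-level objects: both ports are reduced to `nthFrom`, the j-th element of the
-- level-by-level (length-by-length) enumeration of lunlun numbers.

-- the children A's inner loop appends for a popped number with last digit `tail`
def chil (num tail : Int) : List Int → List Int
  | [] => []
  | i :: is =>
    let temp := tail + i
    if temp = -1 ∨ temp = 10 then chil num tail is else (num * 10 + temp) :: chil num tail is

def kids (n : Int) : List Int := chil n (PySem.Int.mod n 10) [-1, 0, 1]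

-- all lunlun numbers obtained from n by appending exactly m digits (depth-first order)
def ext (n : Int) : Nat → List Int
  | 0 => [n]
  | m + 1 => (kids n).flatMap (fun c => ext c m)

-- cnt m d = number of lunlun digit strings of length m+1 starting at digit d
def cnt : Nat → Int → Int
  | 0, _ => 1
  | m + 1, d => ((nbrs d).map (cnt m)).sum

def cntRow (m : Nat) : List Int := (PySem.List.pyRange 0 10 1).map (cnt m)

def rowsRev : Nat → List (List Int)
  | 0 => [cntRow 0]
  | m + 1 => cntRow (m + 1) :: rowsRev m

def nine : List Int := PySem.List.pyRange 1 10 1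

def lv (m : Nat) : List Int := nine.flatMap (fun d => ext d m)

def tot (m : Nat) : Int := (nine.map (cnt m)).sum

-- the j-th element emitted by the BFS queue machine starting from queue q
def emitAux : Nat → List Int → Nat → Int
  | 0, _, _ => 0
  | fuel + 1, q, j =>
    match q with
    | [] => 0
    | n :: rest =>
      let cs := kids n
      if h : j < cs.length then cs[j] else emitAux fuel (rest ++ cs) (j - cs.length)

-- the j-th element of Q ++ Q.flatMap kids ++ …
def nthFrom : Nat → List Int → Nat → Int
  | 0, _, _ => 0
  | fuel + 1, q, j =>
    if h : j < q.length then q[j] else nthFrom fuel (q.flatMap kids) (j - q.length)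

lemma mem_nbrs {e d : Int} : e ∈ nbrs d ↔ (0 ≤ e ∧ e < 10) ∧ |e - d| ≤ 1 := by
  unfold nbrs
  simp [List.mem_filter, PySem.List.mem_pyRange_one]

lemma chil_eq (t : Int) (h0 : 0 ≤ t) (h1 : t < 10) (num : Int) :
    chil num t [-1, 0, 1] = (nbrs t).map (fun e => num * 10 + e) := by
  have h10 : PySem.List.pyRange 0 10 1 = [0,1,2,3,4,5,6,7,8,9] := by decide
  unfold nbrs
  rw [h10]
  interval_cases t <;> norm_num [chil, List.filter_cons]

lemma mod10_lt (n : Int) : 0 ≤ PySem.Int.mod n 10 ∧ PySem.Int.mod n 10 < 10 := by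
  rw [PySem.Int.mod_eq_emod_of_pos (by norm_num)]
  omega

lemma kids_eq (n : Int) (hn : 0 ≤ n) :
    kids n = (nbrs (PySem.Int.mod n 10)).map (fun e => n * 10 + e) := by
  obtain ⟨h0, h1⟩ := mod10_lt n
  exact chil_eq _ h0 h1 n

lemma self_mem_nbrs {t : Int} (h0 : 0 ≤ t) (h1 : t < 10) : t ∈ nbrs t := by
  rw [mem_nbrs]
  constructor
  · exact ⟨h0, h1⟩
  · simp

lemma kids_ne_nil (n : Int) (hn : 0 ≤ n) : kids n ≠ [] := by
  rw [kids_eq n hn]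
  obtain ⟨h0, h1⟩ := mod10_lt n
  have := self_mem_nbrs h0 h1
  intro hc
  rw [List.map_eq_nil_iff] at hc
  rw [hc] at this
  exact List.not_mem_nil this

lemma kids_nonneg (n : Int) (hn : 0 ≤ n) : ∀ x ∈ kids n, 0 ≤ x := by
  rw [kids_eq n hn]
  intro x hx
  obtain ⟨e, he, rfl⟩ := List.mem_map.1 hx
  obtain ⟨⟨he0, _⟩, _⟩ := mem_nbrs.1 he
  omega

lemma cnt_pos (m : Nat) (d : Int) (h0 : 0 ≤ d) (h1 : d < 10) : 1 ≤ cnt m d := by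
  induction m generalizing d with
  | zero => simp [cnt]
  | succ m ih =>
    show 1 ≤ ((nbrs d).map (cnt m)).sum
    have hmem : cnt m d ∈ (nbrs d).map (cnt m) :=
      List.mem_map.2 ⟨d, self_mem_nbrs h0 h1, rfl⟩
    have hnn : ∀ x ∈ (nbrs d).map (cnt m), 0 ≤ x := by
      intro x hx
      obtain ⟨e, he, rfl⟩ := List.mem_map.1 hx
      obtain ⟨⟨he0, he1⟩, _⟩ := mem_nbrs.1 he
      exact le_trans (by norm_num) (ih e he0 he1)
    calc (1 : Int) ≤ cnt m d := ih d h0 h1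
      _ ≤ _ := List.single_le_sum hnn _ hmem

lemma mod10_of_digit (n e : Int) (hn : 0 ≤ n) (h0 : 0 ≤ e) (h1 : e < 10) :
    PySem.Int.mod (n * 10 + e) 10 = e := by
  rw [PySem.Int.mod_eq_emod_of_pos (by norm_num)]
  omega

lemma len_ext (m : Nat) (n : Int) (hn : 0 ≤ n) :
    ((ext n m).length : Int) = cnt m (PySem.Int.mod n 10) := by
  induction m generalizing n with
  | zero => simp [ext, cnt]
  | succ m ih =>
    show (((kids n).flatMap (fun c => ext c m)).length : Int) = _
    rw [kids_eq n hn, List.flatMap_map, List.length_flatMap]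
    show ((((nbrs (PySem.Int.mod n 10)).map _).sum : Nat) : Int) = cnt (m+1) (PySem.Int.mod n 10)
    rw [Nat.cast_list_sum, List.map_map]
    show ((nbrs (PySem.Int.mod n 10)).map _).sum = ((nbrs (PySem.Int.mod n 10)).map (cnt m)).sum
    congr 1
    apply List.map_congr_left
    intro e he
    obtain ⟨⟨he0, he1⟩, _⟩ := mem_nbrs.1 he
    show ((ext (n * 10 + e) m).length : Int) = cnt m e
    rw [ih (n * 10 + e) (by omega), mod10_of_digit n e hn he0 he1]

lemma ext_succ (m : Nat) (n : Int) : ext n (m + 1) = (ext n m).flatMap kids := by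
  induction m generalizing n with
  | zero => simp [ext]
  | succ m ih =>
    show (kids n).flatMap (fun c => ext c (m + 1)) = ((kids n).flatMap (fun c => ext c m)).flatMap kids
    rw [List.flatMap_assoc]
    simp only [ih]

lemma lv_zero : lv 0 = nine := by
  simp [lv, ext]

lemma lv_flatMap (m : Nat) : (lv m).flatMap kids = lv (m + 1) := by
  unfold lv
  rw [List.flatMap_assoc]
  simp only [ext_succ m]

lemma mod10_digit (d : Int) (h0 : 0 ≤ d) (h1 : d < 10) : PySem.Int.mod d 10 = d := by
  rw [PySem.Int.mod_eq_emod_of_pos (by norm_num)]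
  omega

lemma len_lv (m : Nat) : (((lv m).length : Int)) = tot m := by
  unfold lv tot
  rw [List.length_flatMap, Nat.cast_list_sum, List.map_map]
  congr 1
  apply List.map_congr_left
  intro d hd
  obtain ⟨hd1, hd2⟩ := PySem.List.mem_pyRange_one.1 hd
  show ((ext d m).length : Int) = cnt m d
  rw [len_ext m d (by omega), mod10_digit d (by omega) (by omega)]

lemma tot_pos (m : Nat) : 1 ≤ tot m := by
  unfold tot
  have h1 : (1 : Int) ∈ nine := by decide
  have hmem : cnt m 1 ∈ nine.map (cnt m) := List.mem_map.2 ⟨1, h1, rfl⟩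
  have hnn : ∀ x ∈ nine.map (cnt m), 0 ≤ x := by
    intro x hx
    obtain ⟨e, he, rfl⟩ := List.mem_map.1 hx
    obtain ⟨he1, he2⟩ := PySem.List.mem_pyRange_one.1 he
    exact le_trans (by norm_num) (cnt_pos m e (by omega) (by omega))
  calc (1 : Int) ≤ cnt m 1 := cnt_pos m 1 (by norm_num) (by norm_num)
    _ ≤ _ := List.single_le_sum hnn _ hmem

-- ===== A-side =====

lemma bfsInner_spec (k num tail : Int) :
    ∀ (is q lun : List Int) (count : Int) (j : Nat),
      count = (lun.length : Int) → k = count + 1 + (j : Int) →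
      bfsInner k num tail is q lun count =
        (if h : j < (chil num tail is).length
         then (some ((chil num tail is)[j]), q ++ (chil num tail is).take (j + 1),
               lun ++ (chil num tail is).take (j + 1), count + (j : Int) + 1)
         else (none, q ++ chil num tail is, lun ++ chil num tail is,
               count + ((chil num tail is).length : Int))) := by
  intro is
  induction is with
  | nil =>
    intro q lun count j hc hk
    simp [bfsInner, chil]
  | cons i is ih =>
    intro q lun count j hc hk
    by_cases hskip : tail + i = -1 ∨ tail + i = 10
    · have hch : chil num tail (i :: is) = chil num tail is := by
        simp [chil, hskip]
      have hbf : bfsInner k num tail (i :: is) q lun count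
          = bfsInner k num tail is q lun count := by
        simp [bfsInner, hskip]
      rw [hch, hbf]
      exact ih q lun count j hc hk
    · have hch : chil num tail (i :: is) = (num * 10 + (tail + i)) :: chil num tail is := by
        simp [chil, hskip]
      by_cases hk0 : k = count + 1
      · have hj : j = 0 := by omega
        subst hj
        have hget : PySem.List.pyGet? (lun ++ [num * 10 + (tail + i)]) count
            = some (num * 10 + (tail + i)) := by
          rw [hc]
          simpa using PySem.List.pyGet?_append_length (pre := lun)
            (y := num * 10 + (tail + i)) (ys := [])
        have hbf : bfsInner k num tail (i :: is) q lun count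
            = (some (num * 10 + (tail + i)), q ++ [num * 10 + (tail + i)],
               lun ++ [num * 10 + (tail + i)], count + 1) := by
          simp [bfsInner, hskip, hk0, hget]
        rw [hbf, hch]
        rw [dif_pos (by simp)]
        simp
      · have hbf : bfsInner k num tail (i :: is) q lun count
            = bfsInner k num tail is (q ++ [num * 10 + (tail + i)])
                (lun ++ [num * 10 + (tail + i)]) (count + 1) := by
          simp [bfsInner, hskip, hk0]
        obtain ⟨j', rfl⟩ : ∃ j', j = j' + 1 := ⟨j - 1, by omega⟩
        rw [hbf, ih (q ++ [num * 10 + (tail + i)]) (lun ++ [num * 10 + (tail + i)])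
          (count + 1) j' (by simp; omega) (by push_cast at hk ⊢; omega)]
        rw [hch]
        by_cases h' : j' < (chil num tail is).length
        · rw [dif_pos h', dif_pos (by simpa using Nat.succ_lt_succ h')]
          simp only [List.take_succ_cons, List.getElem_cons_succ, List.append_assoc,
            List.cons_append, List.nil_append, Prod.mk.injEq, true_and, and_true]
          push_cast
          ring
        · rw [dif_neg h', dif_neg (by simp; omega)]
          simp only [List.append_assoc, List.cons_append, List.nil_append,
            List.length_cons, Prod.mk.injEq, true_and, and_true]
          push_cast
          ring

lemma kids_def (n : Int) : chil n (PySem.Int.mod n 10) [-1, 0, 1] = kids n := rfl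

lemma bfsLoop_emitAux (k : Int) :
    ∀ (fuel : Nat) (q lun : List Int) (count : Int) (j : Nat),
      count = (lun.length : Int) → k = count + 1 + (j : Int) →
      bfsLoop k fuel q lun count = emitAux fuel q j := by
  intro fuel
  induction fuel with
  | zero => intro q lun count j _ _; rfl
  | succ fuel ih =>
    intro q lun count j hc hk
    cases q with
    | nil => rfl
    | cons num rest =>
      simp only [bfsLoop, emitAux]
      rw [bfsInner_spec k num (PySem.Int.mod num 10) [-1, 0, 1] rest lun count j hc hk,
        kids_def num]
      by_cases h : j < (kids num).length
      · rw [dif_pos h, dif_pos h]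
      · rw [dif_neg h, dif_neg h]
        exact ih (rest ++ kids num) (lun ++ kids num) (count + ((kids num).length : Int))
          (j - (kids num).length) (by push_cast [List.length_append]; omega)
          (by push_cast [Nat.cast_sub (not_lt.1 h)] at hk ⊢; omega)

lemma kids_len_pos (n : Int) (hn : 0 ≤ n) : 1 ≤ (kids n).length := by
  have h := kids_ne_nil n hn
  cases hkn : kids n with
  | nil => exact absurd hkn h
  | cons a l => simp

lemma emitAux_fuel : ∀ (j f1 f2 : Nat) (q : List Int), j < f1 → j < f2 →
    (∀ x ∈ q, 0 ≤ x) → emitAux f1 q j = emitAux f2 q j := by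
  intro j
  induction j using Nat.strong_induction_on with
  | _ j ih =>
    intro f1 f2 q h1 h2 hq
    obtain ⟨f1', rfl⟩ : ∃ t, f1 = t + 1 := ⟨f1 - 1, by omega⟩
    obtain ⟨f2', rfl⟩ : ∃ t, f2 = t + 1 := ⟨f2 - 1, by omega⟩
    cases q with
    | nil => rfl
    | cons n rest =>
      simp only [emitAux]
      have hn : 0 ≤ n := hq n (by simp)
      have hlen : 1 ≤ (kids n).length := kids_len_pos n hn
      by_cases h : j < (kids n).length
      · rw [dif_pos h, dif_pos h]
      · rw [dif_neg h, dif_neg h]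
        refine ih (j - (kids n).length) (by omega) f1' f2' _ (by omega) (by omega) ?_
        intro x hx
        rcases List.mem_append.1 hx with hx | hx
        · exact hq x (List.mem_cons_of_mem _ hx)
        · exact kids_nonneg n hn x hx

lemma emitAux_round : ∀ (A B : List Int) (j fuel : Nat), (∀ x ∈ A, 0 ≤ x) →
    emitAux (fuel + A.length) (A ++ B) j =
      if h : j < (A.flatMap kids).length then (A.flatMap kids)[j]
      else emitAux fuel (B ++ A.flatMap kids) (j - (A.flatMap kids).length) := by
  intro A
  induction A with
  | nil =>
    intro B j fuel hA
    simp
  | cons a A ihA =>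
    intro B j fuel hA
    have ha : 0 ≤ a := hA a (by simp)
    have hstep : fuel + (a :: A).length = (fuel + A.length) + 1 := by
      simp only [List.length_cons]
      omega
    rw [hstep]
    show emitAux ((fuel + A.length) + 1) (a :: (A ++ B)) j = _
    simp only [emitAux]
    by_cases h1 : j < (kids a).length
    · rw [dif_pos h1, dif_pos (by simp [List.flatMap_cons, List.length_append]; omega)]
      simp only [List.flatMap_cons]
      rw [List.getElem_append_left h1]
    · rw [dif_neg h1]
      have hassoc : (A ++ B) ++ kids a = A ++ (B ++ kids a) := by
        rw [List.append_assoc]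
      rw [hassoc, ihA (B ++ kids a) (j - (kids a).length) fuel
        (fun x hx => hA x (List.mem_cons_of_mem _ hx))]
      simp only [List.flatMap_cons, List.length_append]
      by_cases h2 : j - (kids a).length < (A.flatMap kids).length
      · rw [dif_pos h2, dif_pos (by omega)]
        rw [List.getElem_append_right (not_lt.1 h1)]
      · rw [dif_neg h2, dif_neg (by omega)]
        congr 1
        · rw [List.append_assoc]
        · omega

lemma emit_nth : ∀ (j : Nat) (q : List Int) (fuel gfuel : Nat), q ≠ [] → (∀ x ∈ q, 0 ≤ x) →
    j < fuel → j < gfuel → emitAux fuel q j = nthFrom gfuel (q.flatMap kids) j := by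
  intro j
  induction j using Nat.strong_induction_on with
  | _ j ih =>
    intro q fuel gfuel hq hnn hf hg
    obtain ⟨g', rfl⟩ : ∃ t, gfuel = t + 1 := ⟨gfuel - 1, by omega⟩
    have hfm_nn : ∀ x ∈ q.flatMap kids, 0 ≤ x := by
      intro x hx
      obtain ⟨n, hn, hxk⟩ := List.mem_flatMap.1 hx
      exact kids_nonneg n (hnn n hn) x hxk
    have hfm_len : 1 ≤ (q.flatMap kids).length := by
      cases q with
      | nil => exact absurd rfl hq
      | cons n rest =>
        simp only [List.flatMap_cons, List.length_append]
        have := kids_len_pos n (hnn n (by simp))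
        omega
    have hfm_ne : q.flatMap kids ≠ [] := by
      intro hc
      rw [hc] at hfm_len
      simp at hfm_len
    rw [emitAux_fuel j fuel (q.length + (j + 1)) q hf (by omega) hnn]
    have hround := emitAux_round q [] j (j + 1) hnn
    rw [Nat.add_comm q.length (j + 1)] at *
    simp only [List.append_nil, List.nil_append] at hround
    rw [hround]
    simp only [nthFrom]
    by_cases h1 : j < (q.flatMap kids).length
    · rw [dif_pos h1, dif_pos h1]
    · rw [dif_neg h1, dif_neg h1]
      exact ih (j - (q.flatMap kids).length) (by omega) (q.flatMap kids) (j + 1) g'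
        hfm_ne hfm_nn (by omega) (by omega)

lemma nine_init : (PySem.List.pyRange 1 10 1).foldl
    (fun (st : List Int × List Int × Int) i => (st.1 ++ [i], st.2.1 ++ [i], st.2.2 + 1))
    ([], [], 0) = (nine, nine, 9) := by decide

lemma nine_len : nine.length = 9 := by decide

lemma bfs_eq_nthFrom (k : Int) (hk : 1 ≤ k) :
    bfs k = nthFrom k.toNat nine (k - 1).toNat := by
  obtain ⟨t, ht⟩ : ∃ t, k.toNat = t + 1 := ⟨k.toNat - 1, by omega⟩
  unfold bfs
  rw [nine_init]
  show (if (9 : Int) ≥ k then (PySem.List.pyGet? nine (k - 1)).getD 0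
        else bfsLoop k k.toNat nine nine 9) = _
  by_cases hk9 : (9 : Int) ≥ k
  · rw [if_pos hk9]
    have hlt : (k - 1).toNat < nine.length := by rw [nine_len]; omega
    rw [PySem.List.pyGet?_of_nonneg nine (by omega), List.getElem?_eq_getElem hlt]
    rw [ht]
    simp only [nthFrom]
    rw [dif_pos hlt]
    rfl
  · rw [if_neg hk9]
    have hk10 : 10 ≤ k := by omega
    rw [bfsLoop_emitAux k k.toNat nine nine 9 (k - 10).toNat (by decide) (by omega)]
    rw [emit_nth (k - 10).toNat nine k.toNat (k.toNat - 1) (by decide) (by decide)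
      (by omega) (by omega)]
    rw [ht]
    conv_rhs => rw [nthFrom]
    rw [dif_neg (by rw [nine_len]; omega)]
    have h1 : (k - 1).toNat - nine.length = (k - 10).toNat := by rw [nine_len]; omega
    have h2 : t = k.toNat - 1 := by omega
    rw [h1, h2]
    congr 1

-- ===== B-side =====

lemma pyGetD_cntRow (m : Nat) (d : Int) (h0 : 0 ≤ d) (h1 : d < 10) :
    PySem.List.pyGetD (cntRow m) d 0 = cnt m d := by
  exact PySem.List.pyGetD_map_pyRange_of_nonneg (cnt m) 10 d 0 h0 h1

lemma nextRow_cntRow (m : Nat) : nextRow (cntRow m) = cntRow (m + 1) := by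
  unfold nextRow
  show _ = (PySem.List.pyRange 0 10 1).map (cnt (m + 1))
  refine List.map_congr_left ?_
  intro d hd
  obtain ⟨hd0, hd1⟩ := PySem.List.mem_pyRange_one.1 hd
  show ((nbrs d).map (fun e => PySem.List.pyGetD (cntRow m) e 0)).sum = cnt (m + 1) d
  rw [show cnt (m + 1) d = ((nbrs d).map (cnt m)).sum from rfl]
  congr 1
  refine List.map_congr_left ?_
  intro e he
  obtain ⟨⟨he0, he1⟩, _⟩ := mem_nbrs.1 he
  exact pyGetD_cntRow m e he0 he1

lemma rowTotal_cntRow (m : Nat) : rowTotal (cntRow m) = tot m := by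
  unfold rowTotal tot cntRow nine
  rw [PySem.List.slice_from_one]
  rw [PySem.List.pyRange_one_cons (by norm_num : (0 : Int) < 10)]
  norm_num [List.map_cons]

lemma descend_step (row : List Int) (rest : List (List Int)) (num : Int) (ds : List Int)
    (k : Int) : descend (row :: rest) num ds k
      = descend rest (scanDigits row num ds k).1 (scanDigits row num ds k).2.1
          (scanDigits row num ds k).2.2 := rfl

lemma descend_sel : ∀ (m : Nat) (ds : List Int) (num k : Int) (j : Nat),
    0 ≤ num → (∀ d ∈ ds, 0 ≤ d ∧ d < 10) → k = (j : Int) + 1 →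
    (j : Int) + 1 ≤ (ds.map (cnt m)).sum →
    descend (rowsRev m) num ds k = (ds.flatMap (fun d => ext (num * 10 + d) m)).getD j 0 := by
  intro m
  induction m with
  | zero =>
    intro ds num
    induction ds with
    | nil =>
      intro k j _ _ _ hsum
      simp at hsum
      omega
    | cons d ds ihds =>
      intro k j hnum hds hk hsum
      obtain ⟨hd0, hd1⟩ := hds d (by simp)
      have hrow : PySem.List.pyGetD (cntRow 0) d 0 = 1 := pyGetD_cntRow 0 d hd0 hd1
      rw [List.map_cons, List.sum_cons] at hsum
      simp only [cnt] at hsum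
      rw [show rowsRev 0 = [cntRow 0] from rfl, descend_step]
      simp only [scanDigits, hrow]
      by_cases hle : k ≤ 1
      · have hj : j = 0 := by omega
        subst hj
        rw [if_pos hle]
        simp [descend, ext]
      · rw [if_neg hle]
        obtain ⟨j', rfl⟩ : ∃ j', j = j' + 1 := ⟨j - 1, by omega⟩
        show descend (rowsRev 0) num ds (k - 1) = _
        rw [ihds (k - 1) j' hnum (fun e he => hds e (by simp [he]))
          (by push_cast at hk ⊢; omega)
          (by simp only [cnt] at hsum ⊢; push_cast at hsum ⊢; omega)]
        simp [ext]
  | succ m ihm =>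
    intro ds num
    induction ds with
    | nil =>
      intro k j _ _ _ hsum
      simp at hsum
      omega
    | cons d ds ihds =>
      intro k j hnum hds hk hsum
      obtain ⟨hd0, hd1⟩ := hds d (by simp)
      have hrow : PySem.List.pyGetD (cntRow (m + 1)) d 0 = cnt (m + 1) d :=
        pyGetD_cntRow (m + 1) d hd0 hd1
      have hLcast : ((ext (num * 10 + d) (m + 1)).length : Int) = cnt (m + 1) d := by
        rw [len_ext (m + 1) (num * 10 + d) (by omega), mod10_of_digit num d hnum hd0 hd1]
      have hcpos : 1 ≤ cnt (m + 1) d := cnt_pos (m + 1) d hd0 hd1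
      rw [List.map_cons, List.sum_cons] at hsum
      rw [show rowsRev (m + 1) = cntRow (m + 1) :: rowsRev m from rfl, descend_step]
      simp only [scanDigits, hrow]
      have hblock : ext (num * 10 + d) (m + 1)
          = (nbrs d).flatMap (fun e => ext ((num * 10 + d) * 10 + e) m) := by
        show (kids (num * 10 + d)).flatMap (fun c => ext c m) = _
        rw [kids_eq (num * 10 + d) (by omega), mod10_of_digit num d hnum hd0 hd1,
          List.flatMap_map]
      rw [List.flatMap_cons]
      by_cases hle : k ≤ cnt (m + 1) d
      · rw [if_pos hle]
        show descend (rowsRev m) (num * 10 + d) (nbrs d) k = _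
        rw [ihm (nbrs d) (num * 10 + d) k j (by omega)
          (fun e he => (mem_nbrs.1 he).1) hk
          (by rw [show ((nbrs d).map (cnt m)).sum = cnt (m + 1) d from rfl]; omega)]
        rw [List.getD_append _ _ _ _ (by omega), hblock]
      · rw [if_neg hle]
        show descend (rowsRev m) (scanDigits (cntRow (m + 1)) num ds (k - cnt (m + 1) d)).1
          (scanDigits (cntRow (m + 1)) num ds (k - cnt (m + 1) d)).2.1
          (scanDigits (cntRow (m + 1)) num ds (k - cnt (m + 1) d)).2.2 = _
        rw [← descend_step, show cntRow (m + 1) :: rowsRev m = rowsRev (m + 1) from rfl]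
        have hlen_le : (ext (num * 10 + d) (m + 1)).length ≤ j := by omega
        rw [ihds (k - cnt (m + 1) d) (j - (ext (num * 10 + d) (m + 1)).length)
          hnum (fun e he => hds e (by simp [he])) (by omega) (by omega)]
        rw [List.getD_append_right _ _ _ _ hlen_le]

lemma grow_descend : ∀ (fuel m : Nat) (k : Int) (j : Nat) (gfuel : Nat),
    k = (j : Int) + 1 → j < fuel → j < gfuel →
    descend (growRows fuel k ((rowsRev m).reverse)).2.reverse 0 nine
        (growRows fuel k ((rowsRev m).reverse)).1 = nthFrom gfuel (lv m) j := by
  intro fuel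
  induction fuel with
  | zero =>
    intro m k j gfuel _ hf _
    omega
  | succ fuel ih =>
    intro m k j gfuel hk hf hg
    obtain ⟨g', rfl⟩ : ∃ t, gfuel = t + 1 := ⟨gfuel - 1, by omega⟩
    have hlast : (PySem.List.pyGet? ((rowsRev m).reverse) (-1)).getD [] = cntRow m := by
      rw [PySem.List.pyGet?_neg_one, List.getLast?_reverse]
      cases m <;> rfl
    have hlen : ((lv m).length : Int) = tot m := len_lv m
    have htm : 1 ≤ tot m := tot_pos m
    simp only [growRows, hlast, rowTotal_cntRow]
    by_cases hlt : tot m < k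
    · rw [if_pos hlt]
      have hrows : (rowsRev m).reverse ++ [nextRow (cntRow m)] = (rowsRev (m + 1)).reverse := by
        rw [nextRow_cntRow]
        show _ = (cntRow (m + 1) :: rowsRev m).reverse
        rw [List.reverse_cons]
      rw [hrows]
      rw [ih (m + 1) (k - tot m) (j - (lv m).length) g' (by omega) (by omega) (by omega)]
      conv_rhs => rw [nthFrom]
      rw [dif_neg (by omega), lv_flatMap]
    · rw [if_neg hlt]
      show descend ((rowsRev m).reverse).reverse 0 nine k = _
      rw [List.reverse_reverse]
      rw [descend_sel m nine 0 k j (le_refl 0)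
        (fun d hd => by
          obtain ⟨h1, h2⟩ := PySem.List.mem_pyRange_one.1 hd
          exact ⟨by omega, by omega⟩)
        hk (by rw [show (nine.map (cnt m)).sum = tot m from rfl]; omega)]
      simp only [nthFrom]
      rw [dif_pos (by omega)]
      simp only [zero_mul, zero_add]
      rw [show nine.flatMap (fun d => ext d m) = lv m from rfl]
      exact List.getD_eq_getElem (lv m) 0 (by omega)

lemma alt_eq_nthFrom (k : Int) (hk : 1 ≤ k) :
    bfs_alt k = nthFrom k.toNat nine (k - 1).toNat := by
  have h0 : [List.replicate 10 (1 : Int)] = (rowsRev 0).reverse := by decide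
  have h := grow_descend k.toNat 0 k (k - 1).toNat k.toNat (by omega) (by omega) (by omega)
  rw [lv_zero] at h
  show descend (growRows k.toNat k [List.replicate 10 1]).2.reverse 0
    (PySem.List.pyRange 1 10 1) (growRows k.toNat k [List.replicate 10 1]).1 = _
  rw [h0]
  exact h

lemma main_pos (k : Int) (hk : 1 ≤ k) : bfs k = bfs_alt k := by
  rw [bfs_eq_nthFrom k hk, alt_eq_nthFrom k hk]

-- ===== VERDICT (by name: the statement is the Claim_ definition above) =====
theorem bfs_spec : Claim_unchanged_bfs := by
  intro k _ hpre
  intro hD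
  have h : k = -8 ∨ 1 ≤ k := by
    unfold Pre_bfs at hpre; unfold D_bfs at hD; omega
  rcases h with h | h
  · subst h; decide
  · exact main_pos k h

theorem bfs_changed : Claim_changed_bfs := by unfold Claim_changed_bfs; decide

theorem bfs_tight : Claim_exact_bfs := by
  intro k _ _ hD
  unfold D_bfs at hD
  obtain ⟨h1, h2⟩ := hD
  interval_cases k <;> decide
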